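-- pv_equiv track=rewrite | github.com/fiddlydiddle/advent_of_code | 2025/day4/python.py | part2
-- ===== SOURCE A (Python) =====
-- NEIGHBOR_OFFSETS = [
--     (-1, -1),
--     (-1, 0),
--     (-1, 1),
--     (0, -1),
--     (0, 1),
--     (1, -1),
--     (1, 0),
--     (1, 1)
-- ]
--
-- def part1_optimized(input, remove_rolls = False):
--     new_input = [row[:] for row in input]
--     height = len(new_input)
--     width = len(new_input[0])
--     rolls_removed = 0
--
--     # Run through grid and stop at '@' spots. Check for neighbors
--     for row_idx, row in enumerate(new_input):
--         for col_idx, col in enumerate(row):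
--             if col == '@':
--                 num_neighbors = 0
--
--                 # Check for neighboring '@'
--                 for row_offset, col_offset in NEIGHBOR_OFFSETS:
--                     neighbor_row_idx = row_idx + row_offset
--                     neighbor_col_idx = col_idx + col_offset
--
--                     # Boundary check
--                     if is_inbounds(neighbor_row_idx, neighbor_col_idx, width, height):
--                         # Exclude own position from check, otherwise check for '@'
--                         if new_input[neighbor_row_idx][neighbor_col_idx] == '@':
--                             num_neighbors += 1
--
--                 # Roll can be removed
--                 if num_neighbors < 4:
--                     rolls_removed += 1
--                     if remove_rolls:
--                         new_input[row_idx][col_idx] = '.'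
--
--     return new_input, rolls_removed
--
-- def part2(input):
--     new_input = [row[:] for row in input]
--     result = 0
--
--     num_rolls_removed = 1
--
--     # Wrap Part 1 in loop that terminates once a round does not remove any rolls
--     while num_rolls_removed > 0:
--         new_input, num_rolls_removed = part1_optimized(new_input, True)
--         result += num_rolls_removed
--
--     return result
--
-- def is_inbounds(row, col, width, height):
--     return row >= 0 and row < height and col >= 0 and col < width
-- ===== SOURCE B (Python) =====
-- NEIGHBOR_OFFSETS = [
--     (-1, -1),
--     (-1, 0),
--     (-1, 1),
--     (0, -1),
--     (0, 1),
--     (1, -1),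
--     (1, 0),
--     (1, 1)
-- ]
--
-- def part2(input):
--     height = len(input)
--     width = len(input[0])
--     # live set of '@' coordinates; peel in synchronous rounds until stable
--     live = set()
--     for r, row in enumerate(input):
--         for c, cell in enumerate(row):
--             if cell == '@':
--                 live.add((r, c))
--     total = len(live)
--     while True:
--         kept = set()
--         for (r, c) in live:
--             degree = 0
--             for dr, dc in NEIGHBOR_OFFSETS:
--                 nr, nc = r + dr, c + dc
--                 if 0 <= nr < height and 0 <= nc < width and (nr, nc) in live:
--                     degree += 1
--             if degree >= 4:
--                 kept.add((r, c))
--         if len(kept) == len(live):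
--             return total - len(kept)
--         live = kept
-- ===== Notes on version B (the rewrite author's own statement) =====
-- stated objective: alternative
-- what changed: B replaces A's repeated in-place raster sweeps over a mutable grid of strings (each round rescans every cell and removes cells mid-scan) by synchronous-round peeling on a set of live '@' coordinates: each round filters the coordinate set by current neighbor degree, stopping when the set is stable; the two reach the same fixpoint by confluence of the monotone removal process.
import Mathlib
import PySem

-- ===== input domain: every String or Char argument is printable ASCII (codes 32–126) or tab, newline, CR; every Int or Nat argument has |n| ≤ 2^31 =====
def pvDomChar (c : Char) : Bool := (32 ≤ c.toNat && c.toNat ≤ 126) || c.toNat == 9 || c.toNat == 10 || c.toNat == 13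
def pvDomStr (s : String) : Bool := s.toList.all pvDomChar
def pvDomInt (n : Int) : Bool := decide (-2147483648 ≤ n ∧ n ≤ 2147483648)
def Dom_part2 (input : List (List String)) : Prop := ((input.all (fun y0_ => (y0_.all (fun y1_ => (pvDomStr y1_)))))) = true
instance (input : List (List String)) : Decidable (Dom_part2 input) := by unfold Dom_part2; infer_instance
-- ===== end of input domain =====

-- B replaces A's repeated in-place raster sweeps over a mutable grid by synchronous-round
-- peeling on the set of live '@' coordinates (alternative algorithm, same fixpoint by confluence).

-- ===== PORT A =====
def pyOffsets : List (Int × Int) :=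
  [(-1, -1), (-1, 0), (-1, 1), (0, -1), (0, 1), (1, -1), (1, 0), (1, 1)]

def is_inbounds (row col width height : Int) : Bool :=
  decide (0 ≤ row ∧ row < height ∧ 0 ≤ col ∧ col < width)

-- grid read new_input[r][c] for Int indices; used only under the is_inbounds guard (0 ≤ r, 0 ≤ c),
-- where it is exactly Python's indexing on the inputs admitted by Pre_part2
def atStr (g : List (List String)) (r c : Int) : String :=
  if 0 ≤ r ∧ 0 ≤ c then (g.getD r.toNat []).getD c.toNat "" else ""

def setCell (g : List (List String)) (r c : Nat) (s : String) : List (List String) :=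
  g.set r ((g.getD r []).set c s)

-- one cell visit of part1_optimized's nested scan (state: current grid, rolls_removed)
def visitA (w h : Int) (s : List (List String) × Int) (r c : Nat) : List (List String) × Int :=
  if (s.1.getD r []).getD c "" = "@" then
    let n := pyOffsets.foldl (fun acc o =>
      if is_inbounds ((r : Int) + o.1) ((c : Int) + o.2) w h then
        (if atStr s.1 ((r : Int) + o.1) ((c : Int) + o.2) = "@" then acc + 1 else acc)
      else acc) (0 : Int)
    if n < 4 then (setCell s.1 r c ".", s.2 + 1) else s
  else s

-- part1_optimized(g, True): rows scanned in order, cells removed in place mid-scan.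
-- Row lengths never change during the scan, so ranging over g's row lengths is Python's enumerate.
def sweepA (g : List (List String)) : List (List String) × Int :=
  (List.range g.length).foldl (fun s r =>
    (List.range ((g.getD r []).length)).foldl (fun s' c =>
      visitA (((g.headD []).length : Int)) ((g.length : Int)) s' r c) s) (g, 0)

-- part2's while-loop; the fuel (total number of cells + 1) is a totality guard only:
-- every iteration that continues removes at least one '@'.
def part2Go : Nat → List (List String) → Int
  | 0, _ => 0
  | (f + 1), g =>
    let p := sweepA g
    if p.2 > 0 then p.2 + part2Go f p.1 else 0

def part2 (input : List (List String)) : Int :=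
  part2Go ((input.map List.length).sum + 1) input

-- ===== PORT B =====
-- the set {(r, c) | input[r][c] == '@'} in insertion order
def buildLive (g : List (List String)) : List (Int × Int) :=
  (List.range g.length).flatMap (fun r =>
    (List.range ((g.getD r []).length)).filterMap (fun c =>
      if (g.getD r []).getD c "" = "@" then some ((r : Int), (c : Int)) else none))

def degList (w h : Int) (live : List (Int × Int)) (v : Int × Int) : Int :=
  pyOffsets.foldl (fun acc o =>
    if 0 ≤ v.1 + o.1 ∧ v.1 + o.1 < h ∧ 0 ≤ v.2 + o.2 ∧ v.2 + o.2 < w ∧ (v.1 + o.1, v.2 + o.2) ∈ live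
    then acc + 1 else acc) 0

-- B's while-loop: keep the cells with degree ≥ 4, stop when the set is stable;
-- fuel (|live| + 1) is a totality guard: each continuing round strictly shrinks the set.
def bGo : Nat → Int → Int → Int → List (Int × Int) → Int
  | 0, _, _, _, _ => 0
  | (f + 1), w, h, total, live =>
    let kept := live.filter (fun v => 4 ≤ degList w h live v)
    if kept.length = live.length then total - (kept.length : Int)
    else bGo f w h total kept

def part2_alt (input : List (List String)) : Int :=
  let live := buildLive input
  bGo (live.length + 1) (((input.headD []).length : Int)) ((input.length : Int))
    ((live.length : Int)) live

-- ===== PRECONDITION & SPEC =====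
-- Pre_ excludes exactly the inputs where Python A raises IndexError: the empty grid
-- (len(input[0])) and ragged grids where some '@' cell has an is_inbounds neighbor position
-- whose (shorter) row does not reach that column.
def Pre_part2 (input : List (List String)) : Prop :=
  input ≠ [] ∧
  ∀ r < input.length, ∀ c < (input.getD r []).length,
    ∀ dr ∈ ([-1, 0, 1] : List Int), ∀ dc ∈ ([-1, 0, 1] : List Int),
      ((input.getD r []).getD c "" = "@" ∧
        0 ≤ (r : Int) + dr ∧ (r : Int) + dr < (input.length : Int) ∧
        0 ≤ (c : Int) + dc ∧ (c : Int) + dc < ((input.headD []).length : Int)) →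
      ((c : Int) + dc).toNat < (input.getD ((r : Int) + dr).toNat []).length

instance (input : List (List String)) : Decidable (Pre_part2 input) := by
  unfold Pre_part2; infer_instance

def pvWitness_part2 : List (List String) := [["@"]]

def Spec_part2 (input : List (List String)) (out : Int) : Prop := out = part2_alt input
instance (input : List (List String)) (out : Int) : Decidable (Spec_part2 input out) := by
  unfold Spec_part2; infer_instance

-- ===== CLAIM (what is proved, stated in full; the proofs are below) =====
def Claim_equal_part2 : Prop :=
  ∀ (input : List (List String)), Dom_part2 input → Pre_part2 input → Spec_part2 input (part2 input)

-- ===== LEMMAS AND PROOFS =====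

-- cell of a grid at Nat coordinates
def cellAt (g : List (List String)) (r c : Nat) : String := (g.getD r []).getD c ""

-- the live-'@' predicate of a grid, as a Bool function on Int coordinates
def fA (g : List (List String)) (v : Int × Int) : Bool := decide (atStr g v.1 v.2 = "@")

def InB (w h : Int) (u : Int × Int) : Bool := decide (0 ≤ u.1 ∧ u.1 < h ∧ 0 ≤ u.2 ∧ u.2 < w)

-- neighbor degree of v under live-predicate f (the common abstraction of both ports' counters)
def degF (w h : Int) (f : Int × Int → Bool) (v : Int × Int) : Int :=
  pyOffsets.foldl (fun acc o =>
    if InB w h (v.1 + o.1, v.2 + o.2) && f (v.1 + o.1, v.2 + o.2) then acc + 1 else acc) 0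

def Good (w h : Int) (f : Int × Int → Bool) : Prop := ∀ v, f v = true → 4 ≤ degF w h f v

def SubF (f f' : Int × Int → Bool) : Prop := ∀ v, f v = true → f' v = true

def Shape (g : List (List String)) : List Nat := g.map List.length

def cnt (g : List (List String)) : Int := ((buildLive g).length : Int)

-- generic foldl facts -------------------------------------------------------

theorem foldl_pres {σ α : Type} (step : σ → α → σ) (I : σ → Prop)
    (h : ∀ s a, I s → I (step s a)) :
    ∀ (l : List α) (s : σ), I s → I (l.foldl step s) := by
  intro l
  induction l with
  | nil => intro s hs; simpa using hs
  | cons a l ih => intro s hs; simpa using ih (step s a) (h s a hs)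

theorem foldl_count_mono {α : Type} (os : List α) (p p' : α → Prop)
    [DecidablePred p] [DecidablePred p'] (himp : ∀ o, p o → p' o) :
    ∀ (a a' : Int), a ≤ a' →
      os.foldl (fun acc o => if p o then acc + 1 else acc) a ≤
      os.foldl (fun acc o => if p' o then acc + 1 else acc) a' := by
  induction os with
  | nil => intro a a' h; simpa using h
  | cons o os ih =>
    intro a a' h
    simp only [List.foldl_cons]
    by_cases hp : p o
    · rw [if_pos hp, if_pos (himp o hp)]; exact ih _ _ (by omega)
    · rw [if_neg hp]
      by_cases hp' : p' o
      · rw [if_pos hp']; exact ih _ _ (by omega)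
      · rw [if_neg hp']; exact ih _ _ h

theorem foldl_measure_mono {σ α : Type} (step : σ → α → σ) (m : σ → Int)
    (h : ∀ s a, m s ≤ m (step s a)) :
    ∀ (l : List α) (s : σ), m s ≤ m (l.foldl step s) := by
  intro l
  induction l with
  | nil => intro s; simp
  | cons a l ih => intro s; simpa using le_trans (h s a) (ih (step s a))

theorem foldl_stationary {σ α : Type} (step : σ → α → σ) (m : σ → Int)
    (hmono : ∀ s a, m s ≤ m (step s a))
    (hid : ∀ s a, m (step s a) = m s → step s a = s) :
    ∀ (l : List α) (s : σ), m (l.foldl step s) = m s →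
      l.foldl step s = s ∧ ∀ a ∈ l, step s a = s := by
  intro l
  induction l with
  | nil => intro s _; exact ⟨rfl, by simp⟩
  | cons a l ih =>
    intro s hm
    simp only [List.foldl_cons] at hm ⊢
    have h1 : m s ≤ m (step s a) := hmono s a
    have h2 : m (step s a) ≤ m (l.foldl step (step s a)) := foldl_measure_mono step m hmono l _
    have heq : step s a = s := hid s a (by omega)
    rw [heq] at hm ⊢
    rcases ih s hm with ⟨hf, hall⟩
    refine ⟨hf, ?_⟩
    intro b hb
    rcases List.mem_cons.1 hb with hba | hbl
    · rw [hba]; exact heq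
    · exact hall b hbl

theorem filterMap_range_length_pred {β : Type} (x : β) :
    ∀ (n c : Nat) (f f' : Nat → Option β), c < n →
      (∀ i, i ≠ c → f i = f' i) → f c = some x → f' c = none →
      ((List.range n).filterMap f).length = ((List.range n).filterMap f').length + 1 := by
  intro n
  induction n with
  | zero => intro c f f' hc; omega
  | succ n ih =>
    intro c f f' hc hagree hfc hfc'
    rw [List.range_succ, List.filterMap_append, List.filterMap_append,
      List.length_append, List.length_append]
    by_cases hcn : c = n
    · have hpre : (List.range n).filterMap f = (List.range n).filterMap f' := by
        apply List.filterMap_congr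
        intro i hi
        have hin : i < n := List.mem_range.1 hi
        exact hagree i (by omega)
      have hfn : f n = some x := by rw [← hcn]; exact hfc
      have hfn' : f' n = none := by rw [← hcn]; exact hfc'
      rw [hpre]
      simp [List.filterMap, hfn, hfn']
    · have hlt : c < n := by omega
      have hlen := ih c f f' hlt hagree hfc hfc'
      have hn : f n = f' n := hagree n (by omega)
      have h2 : (List.filterMap f [n]).length = (List.filterMap f' [n]).length := by
        simp [List.filterMap, hn]
      omega

-- degF plumbing -------------------------------------------------------------

theorem degF_mono (w h : Int) (f f' : Int × Int → Bool) (hs : SubF f f') (v : Int × Int) :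
    degF w h f v ≤ degF w h f' v := by
  unfold degF
  exact foldl_count_mono pyOffsets _ _
    (fun o ho => by
      simp only [Bool.and_eq_true] at ho ⊢
      exact ⟨ho.1, hs _ ho.2⟩) 0 0 le_rfl

theorem degList_eq_degF (w h : Int) (live : List (Int × Int)) (v : Int × Int) :
    degList w h live v = degF w h (fun u => decide (u ∈ live)) v := by
  unfold degList degF InB
  congr 1
  funext acc o
  by_cases h1 : 0 ≤ v.1 + o.1 ∧ v.1 + o.1 < h ∧ 0 ≤ v.2 + o.2 ∧ v.2 + o.2 < w
  · by_cases h2 : (v.1 + o.1, v.2 + o.2) ∈ live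
    · simp [h1, h2]
    · simp [h1, h2]
  · simp only [Bool.and_eq_true, decide_eq_true_eq]
    rw [if_neg (by tauto), if_neg (by tauto)]

-- characterization of one A-visit
theorem visitA_eq_ite (w h : Int) (s : List (List String) × Int) (r c : Nat) :
    visitA w h s r c =
      if cellAt s.1 r c = "@" ∧ degF w h (fA s.1) ((r : Int), (c : Int)) < 4
      then (setCell s.1 r c ".", s.2 + 1) else s := by
  have hcnt : (pyOffsets.foldl (fun acc o =>
      if is_inbounds ((r : Int) + o.1) ((c : Int) + o.2) w h then
        (if atStr s.1 ((r : Int) + o.1) ((c : Int) + o.2) = "@" then acc + 1 else acc)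
      else acc) (0 : Int)) = degF w h (fA s.1) ((r : Int), (c : Int)) := by
    unfold degF
    congr 1
    funext acc o
    by_cases hib : 0 ≤ (r : Int) + o.1 ∧ (r : Int) + o.1 < h ∧ 0 ≤ (c : Int) + o.2 ∧ (c : Int) + o.2 < w
    · by_cases hat : atStr s.1 ((r : Int) + o.1) ((c : Int) + o.2) = "@"
      · simp [is_inbounds, InB, fA, hib, hat]
      · simp [is_inbounds, InB, fA, hib, hat]
    · simp [is_inbounds, InB, fA, hib]
  simp only [visitA, hcnt, cellAt]
  split_ifs with h1 h2 h3 h3 <;> first | rfl | tauto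

-- fA / buildLive facts -------------------------------------------------------

theorem sum_map_range_pred :
    ∀ (n r : Nat), r < n → ∀ (φ φ' : Nat → Nat), (∀ i, i ≠ r → φ i = φ' i) → φ' r = φ r + 1 →
      ((List.range n).map φ').sum = ((List.range n).map φ).sum + 1 := by
  intro n
  induction n with
  | zero => intro r hr; omega
  | succ n ih =>
    intro r hr φ φ' hagree hdiff
    rw [List.range_succ, List.map_append, List.map_append, List.sum_append, List.sum_append]
    by_cases hrn : r = n
    · have hpre : (List.range n).map φ' = (List.range n).map φ := by
        apply List.map_congr_left
        intro i hi
        have hin : i < n := List.mem_range.1 hi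
        exact (hagree i (by omega)).symm
      have hn' : φ' n = φ n + 1 := by rw [← hrn]; exact hdiff
      rw [hpre]
      simp [hn']
      omega
    · have hlen := ih r (by omega) φ φ' hagree hdiff
      have hn : φ n = φ' n := hagree n (by omega)
      simp [hn] at *
      omega

theorem shape_length {g g' : List (List String)} (hsh : Shape g' = Shape g) :
    g'.length = g.length := by
  have := congrArg List.length hsh
  simpa [Shape] using this

theorem shape_rowlen {g g' : List (List String)} (hsh : Shape g' = Shape g) (r : Nat) :
    (g'.getD r []).length = (g.getD r []).length := by
  have hlen : g'.length = g.length := shape_length hsh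
  by_cases hr : r < g.length
  · have hr' : r < g'.length := by omega
    have h1 : (g'.map List.length)[r]'(by simpa using hr') =
        (g.map List.length)[r]'(by simpa using hr) := by
      unfold Shape at hsh
      exact List.getElem_of_eq hsh _
    rw [List.getElem_map, List.getElem_map] at h1
    rw [List.getD_eq_getElem g' [] hr', List.getD_eq_getElem g [] hr]
    exact h1
  · rw [List.getD_eq_default _ _ (by omega), List.getD_eq_default _ _ (by omega)]

theorem cellAt_at_lt (g : List (List String)) (r c : Nat) (h : cellAt g r c = "@") :
    r < g.length ∧ c < (g.getD r []).length := by
  unfold cellAt at h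
  by_cases hr : r < g.length
  · refine ⟨hr, ?_⟩
    by_contra hc
    rw [List.getD_eq_default _ _ (by omega)] at h
    exact absurd h (by decide)
  · exfalso
    rw [List.getD_eq_default (d := ([] : List String)) _ (by omega)] at h
    simp at h

theorem fA_iff_mem (g : List (List String)) (v : Int × Int) :
    fA g v = true ↔ v ∈ buildLive g := by
  constructor
  · intro hv
    unfold fA atStr at hv
    rw [decide_eq_true_eq] at hv
    by_cases hnn : 0 ≤ v.1 ∧ 0 ≤ v.2
    · rw [if_pos hnn] at hv
      have hb := cellAt_at_lt g v.1.toNat v.2.toNat hv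
      unfold buildLive
      refine List.mem_flatMap.2 ⟨v.1.toNat, List.mem_range.2 hb.1, ?_⟩
      refine List.mem_filterMap.2 ⟨v.2.toNat, List.mem_range.2 hb.2, ?_⟩
      rw [if_pos hv]
      have h1 : ((v.1.toNat : Int), (v.2.toNat : Int)) = v := by
        cases v with
        | mk a b => simp only [Prod.mk.injEq]; constructor <;> omega
      rw [h1]
    · rw [if_neg hnn] at hv
      exact absurd hv (by decide)
  · intro hv
    unfold buildLive at hv
    rcases List.mem_flatMap.1 hv with ⟨r, hr, hv2⟩
    rcases List.mem_filterMap.1 hv2 with ⟨c, hc, heq⟩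
    by_cases hcell : (g.getD r []).getD c "" = "@"
    · rw [if_pos hcell] at heq
      have hveq : v = ((r : Int), (c : Int)) := by
        injection heq with h
        exact h.symm
      rw [hveq]
      unfold fA atStr
      rw [decide_eq_true_eq, if_pos ⟨Int.natCast_nonneg r, Int.natCast_nonneg c⟩]
      simpa using hcell
    · rw [if_neg hcell] at heq
      exact absurd heq (by simp)

theorem fA_natCast (g : List (List String)) (r c : Nat) :
    fA g ((r : Int), (c : Int)) = true ↔ cellAt g r c = "@" := by
  simp [fA, atStr, cellAt]

theorem shape_setCell (g : List (List String)) (r c : Nat) (s : String) :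
    Shape (setCell g r c s) = Shape g := by
  unfold Shape setCell
  by_cases hr : r < g.length
  · rw [List.map_set]
    have hg : g.getD r [] = g[r] := List.getD_eq_getElem g [] hr
    rw [hg, List.length_set]
    have hlen : r < (List.map List.length g).length := by simpa using hr
    have hmap : (List.map List.length g)[r] = g[r].length := List.getElem_map _ (h := hlen)
    rw [← hmap, List.set_getElem_self hlen]
  · rw [List.set_eq_of_length_le (by omega)]

theorem cellAt_setCell (g : List (List String)) (r c : Nat) (s : String) (r' c' : Nat)
    (hr : r < g.length) (hc : c < (g.getD r []).length) :
    cellAt (setCell g r c s) r' c' = if r' = r ∧ c' = c then s else cellAt g r' c' := by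
  unfold cellAt setCell
  rw [List.getD_eq_getElem?_getD (l := g.set r _)]
  rw [List.getElem?_set]
  by_cases hrr : r = r'
  · subst hrr
    rw [if_pos rfl, if_pos hr]
    simp only [Option.getD_some]
    rw [List.getD_eq_getElem?_getD (l := (g.getD r []).set c s), List.getElem?_set]
    by_cases hcc : c = c'
    · subst hcc
      rw [if_pos rfl, if_pos hc]
      simp
    · rw [if_neg hcc, if_neg (by tauto)]
      simp only [List.getD_eq_getElem?_getD]
  · rw [if_neg hrr, if_neg (by tauto)]
    simp only [List.getD_eq_getElem?_getD]

theorem fA_setCell_dot (g : List (List String)) (r c : Nat)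
    (hr : r < g.length) (hc : c < (g.getD r []).length) (v : Int × Int) :
    fA (setCell g r c ".") v = true ↔ (fA g v = true ∧ v ≠ ((r : Int), (c : Int))) := by
  unfold fA atStr
  by_cases hnn : 0 ≤ v.1 ∧ 0 ≤ v.2
  · rw [if_pos hnn, if_pos hnn, decide_eq_true_eq, decide_eq_true_eq]
    have hsc := cellAt_setCell g r c "." v.1.toNat v.2.toNat hr hc
    unfold cellAt at hsc
    rw [hsc]
    by_cases hrc : v.1.toNat = r ∧ v.2.toNat = c
    · rw [if_pos hrc]
      have hveq : v = ((r : Int), (c : Int)) := by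
        cases v with
        | mk a b => simp only [Prod.mk.injEq]; constructor <;> omega
      simp [hveq]
    · rw [if_neg hrc]
      have hne : v ≠ ((r : Int), (c : Int)) := by
        intro hveq
        apply hrc
        rw [hveq]
        simp
      simp [hne]
  · rw [if_neg hnn, if_neg hnn]
    simp

theorem cnt_setCell_dot (g : List (List String)) (r c : Nat) (h : cellAt g r c = "@") :
    cnt (setCell g r c ".") + 1 = cnt g := by
  rcases cellAt_at_lt g r c h with ⟨hr, hc⟩
  have hsh : Shape (setCell g r c ".") = Shape g := shape_setCell g r c "."
  have hlen : (setCell g r c ".").length = g.length := shape_length hsh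
  have hrowne : ∀ r'', r'' ≠ r → (setCell g r c ".").getD r'' [] = g.getD r'' [] := by
    intro r'' hne
    unfold setCell
    simp only [List.getD_eq_getElem?_getD, List.getElem?_set]
    rw [if_neg (by omega)]
  have hrowr : (setCell g r c ".").getD r [] = (g.getD r []).set c "." := by
    unfold setCell
    simp only [List.getD_eq_getElem?_getD, List.getElem?_set]
    simp [hr]
  unfold cnt buildLive
  rw [List.length_flatMap, List.length_flatMap, hlen]
  have hsum : ((List.range g.length).map (fun r' =>
        ((List.range ((g.getD r' []).length)).filterMap (fun c' =>
          if (g.getD r' []).getD c' "" = "@" then some ((r' : Int), (c' : Int)) else none)).length)).sum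
      = ((List.range g.length).map (fun r' =>
        ((List.range (((setCell g r c ".").getD r' []).length)).filterMap (fun c' =>
          if ((setCell g r c ".").getD r' []).getD c' "" = "@" then some ((r' : Int), (c' : Int)) else none)).length)).sum + 1 := by
    apply sum_map_range_pred g.length r hr
    · intro i hi
      rw [hrowne i hi]
    · rw [hrowr, List.length_set]
      refine filterMap_range_length_pred ((r : Int), (c : Int)) ((g.getD r []).length) c _ _ hc ?_ ?_ ?_
      · intro i hi
        have : ((g.getD r []).set c ".").getD i "" = (g.getD r []).getD i "" := by
          simp only [List.getD_eq_getElem?_getD, List.getElem?_set]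
          rw [if_neg (by omega)]
        rw [this]
      · unfold cellAt at h
        rw [if_pos h]
      · have hgd : ((g.getD r []).set c ".").getD c "" = "." := by
          simp only [List.getD_eq_getElem?_getD, List.getElem?_set]
          have hc' : c < ((g[r]?.getD ([] : List String))).length := by
            rw [← List.getD_eq_getElem?_getD]; exact hc
          simp [hc']
        rw [hgd]
        simp
  omega

theorem buildLive_filter (g g' : List (List String)) (hsh : Shape g' = Shape g)
    (hsub : SubF (fA g') (fA g)) :
    buildLive g' = (buildLive g).filter (fA g') := by
  unfold buildLive
  rw [List.filter_flatMap, shape_length hsh]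
  apply List.flatMap_congr
  intro r _
  rw [List.filter_filterMap, shape_rowlen hsh r]
  apply List.filterMap_congr
  intro c _
  by_cases hg' : (g'.getD r []).getD c "" = "@"
  · have hfa' : fA g' ((r : Int), (c : Int)) = true := (fA_natCast g' r c).2 hg'
    have hfa : (g.getD r []).getD c "" = "@" := (fA_natCast g r c).1 (hsub _ hfa')
    rw [if_pos hg', if_pos hfa]
    simp [Option.filter_some, hfa']
  · rw [if_neg hg']
    by_cases hfa : (g.getD r []).getD c "" = "@"
    · have hfa'f : fA g' ((r : Int), (c : Int)) = false := by
        rcases Bool.eq_false_or_eq_true (fA g' ((r : Int), (c : Int))) with hb | hb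
        · exact absurd ((fA_natCast g' r c).1 hb) hg'
        · exact hb
      rw [if_pos hfa]
      simp [Option.filter_some, hfa'f]
    · rw [if_neg hfa]
      simp [Option.filter]

-- sweep roll-up --------------------------------------------------------------

theorem headD_eq_getD (l : List (List String)) : l.headD [] = l.getD 0 [] := by
  cases l <;> simp

theorem visitA_facts (w h : Int) (s : List (List String) × Int) (r c : Nat) :
    Shape (visitA w h s r c).1 = Shape s.1 ∧
    SubF (fA (visitA w h s r c).1) (fA s.1) ∧
    (∀ S, Good w h S → SubF S (fA s.1) → SubF S (fA (visitA w h s r c).1)) ∧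
    cnt (visitA w h s r c).1 + (visitA w h s r c).2 = cnt s.1 + s.2 ∧
    s.2 ≤ (visitA w h s r c).2 ∧
    ((visitA w h s r c).2 = s.2 → visitA w h s r c = s) := by
  rw [visitA_eq_ite]
  by_cases hrem : cellAt s.1 r c = "@" ∧ degF w h (fA s.1) ((r : Int), (c : Int)) < 4
  · rw [if_pos hrem]
    rcases cellAt_at_lt s.1 r c hrem.1 with ⟨hr, hc⟩
    refine ⟨shape_setCell _ _ _ _, ?_, ?_, ?_, by simp, ?_⟩
    · intro v hv
      exact ((fA_setCell_dot s.1 r c hr hc v).1 hv).1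
    · intro S hgood hsubS v hv
      have hvne : v ≠ ((r : Int), (c : Int)) := by
        intro hveq
        have h4 : (4 : Int) ≤ degF w h S v := hgood v hv
        have hm : degF w h S v ≤ degF w h (fA s.1) v := degF_mono w h S (fA s.1) hsubS v
        rw [hveq] at h4 hm
        omega
      exact (fA_setCell_dot s.1 r c hr hc v).2 ⟨hsubS v hv, hvne⟩
    · have := cnt_setCell_dot s.1 r c hrem.1
      simp only
      omega
    · intro habs
      simp only at habs
      omega
  · rw [if_neg hrem]
    exact ⟨rfl, fun v hv => hv, fun S _ hs => hs, by omega, le_refl _, fun _ => rfl⟩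

theorem sweepA_spec (g : List (List String)) :
    Shape (sweepA g).1 = Shape g ∧
    SubF (fA (sweepA g).1) (fA g) ∧
    (∀ S, Good (((g.headD []).length : Int)) ((g.length : Int)) S → SubF S (fA g) →
      SubF S (fA (sweepA g).1)) ∧
    cnt (sweepA g).1 + (sweepA g).2 = cnt g ∧
    0 ≤ (sweepA g).2 ∧
    ((sweepA g).2 = 0 → (sweepA g).1 = g ∧
      Good (((g.headD []).length : Int)) ((g.length : Int)) (fA g)) := by
  have hInv : ∀ (gs : List (List String) × Int),
      (Shape gs.1 = Shape g ∧ SubF (fA gs.1) (fA g) ∧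
        (∀ S, Good (((g.headD []).length : Int)) ((g.length : Int)) S → SubF S (fA g) →
          SubF S (fA gs.1)) ∧
        cnt gs.1 + gs.2 = cnt g ∧ 0 ≤ gs.2) →
      ∀ r c : Nat,
      (Shape (visitA (((g.headD []).length : Int)) ((g.length : Int)) gs r c).1 = Shape g ∧
        SubF (fA (visitA (((g.headD []).length : Int)) ((g.length : Int)) gs r c).1) (fA g) ∧
        (∀ S, Good (((g.headD []).length : Int)) ((g.length : Int)) S → SubF S (fA g) →
          SubF S (fA (visitA (((g.headD []).length : Int)) ((g.length : Int)) gs r c).1)) ∧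
        cnt (visitA (((g.headD []).length : Int)) ((g.length : Int)) gs r c).1 +
          (visitA (((g.headD []).length : Int)) ((g.length : Int)) gs r c).2 = cnt g ∧
        0 ≤ (visitA (((g.headD []).length : Int)) ((g.length : Int)) gs r c).2) := by
    intro gs hgs r c
    rcases visitA_facts (((g.headD []).length : Int)) ((g.length : Int)) gs r c with
      ⟨hsh, hsub, hpres, hcons, hmono, _⟩
    refine ⟨hsh.trans hgs.1, fun v hv => hgs.2.1 v (hsub v hv),
      fun S hg hs => hpres S hg (hgs.2.2.1 S hg hs), by omega, by omega⟩
  have hmain : Shape (sweepA g).1 = Shape g ∧ SubF (fA (sweepA g).1) (fA g) ∧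
      (∀ S, Good (((g.headD []).length : Int)) ((g.length : Int)) S → SubF S (fA g) →
        SubF S (fA (sweepA g).1)) ∧
      cnt (sweepA g).1 + (sweepA g).2 = cnt g ∧ 0 ≤ (sweepA g).2 := by
    unfold sweepA
    exact foldl_pres _
      (fun gs => Shape gs.1 = Shape g ∧ SubF (fA gs.1) (fA g) ∧
        (∀ S, Good (((g.headD []).length : Int)) ((g.length : Int)) S → SubF S (fA g) →
          SubF S (fA gs.1)) ∧
        cnt gs.1 + gs.2 = cnt g ∧ 0 ≤ gs.2)
      (fun s r hI => foldl_pres _ _ (fun s' c hI' => hInv s' hI' r c) _ s hI)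
      (List.range g.length) (g, 0)
      ⟨rfl, fun v hv => hv, fun S _ hs => hs, by simp, le_refl _⟩
  refine ⟨hmain.1, hmain.2.1, hmain.2.2.1, hmain.2.2.2.1, hmain.2.2.2.2, ?_⟩
  intro hz
  have hvmono : ∀ (s : List (List String) × Int) (c : Nat × Nat),
      s.2 ≤ (visitA (((g.headD []).length : Int)) ((g.length : Int)) s c.1 c.2).2 := by
    intro s c
    exact (visitA_facts _ _ s c.1 c.2).2.2.2.2.1
  have hstat := foldl_stationary
    (fun s r => (List.range ((g.getD r []).length)).foldl
      (fun s' c => visitA (((g.headD []).length : Int)) ((g.length : Int)) s' r c) s)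
    (fun s => s.2)
    (fun s r => foldl_measure_mono _ _ (fun s' c => hvmono s' (r, c)) _ s)
    (fun s r hm => (foldl_stationary _ (fun s' => s'.2) (fun s' c => hvmono s' (r, c))
      (fun s' c hm' => (visitA_facts _ _ s' r c).2.2.2.2.2 hm') _ s hm).1)
    (List.range g.length) (g, 0) (by simpa [sweepA] using hz)
  have hsw : sweepA g = (g, 0) := by
    unfold sweepA
    exact hstat.1
  refine ⟨by rw [hsw], ?_⟩
  intro v hv
  rcases List.mem_flatMap.1 ((fA_iff_mem g v).1 hv) with ⟨r, hr, hv2⟩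
  rcases List.mem_filterMap.1 hv2 with ⟨c, hc, heq⟩
  by_cases hcell : (g.getD r []).getD c "" = "@"
  · rw [if_pos hcell] at heq
    have hveq : v = ((r : Int), (c : Int)) := by
      injection heq with hx
      exact hx.symm
    have hrowid : (List.foldl
        (fun s' c' => visitA (((g.headD []).length : Int)) ((g.length : Int)) s' r c')
        (g, 0) (List.range ((g.getD r []).length))) = (g, 0) := hstat.2 r hr
    have hcolstat := foldl_stationary
      (fun s' (c' : Nat) => visitA (((g.headD []).length : Int)) ((g.length : Int)) s' r c')
      (fun s' => s'.2)
      (fun s' c' => hvmono s' (r, c'))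
      (fun s' c' hm' => (visitA_facts _ _ s' r c').2.2.2.2.2 hm')
      (List.range ((g.getD r []).length)) (g, 0)
      (by rw [hrowid])
    have hvid : visitA (((g.headD []).length : Int)) ((g.length : Int)) (g, 0) r c = (g, 0) :=
      hcolstat.2 c hc
    have hite : ((g, (0 : Int)) : List (List String) × Int) =
        if cellAt g r c = "@" ∧
            degF (((g.headD []).length : Int)) ((g.length : Int)) (fA g) ((r : Int), (c : Int)) < 4
        then (setCell g r c ".", (0 : Int) + 1) else (g, 0) := by
      have h0 := visitA_eq_ite (((g.headD []).length : Int)) ((g.length : Int)) (g, 0) r c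
      rw [hvid] at h0
      exact h0
    by_cases hcond : cellAt g r c = "@" ∧
        degF (((g.headD []).length : Int)) ((g.length : Int)) (fA g) ((r : Int), (c : Int)) < 4
    · rw [if_pos hcond] at hite
      have h1 : (0 : Int) = 0 + 1 := congrArg Prod.snd hite
      omega
    · rw [hveq]
      by_contra hlt
      exact hcond ⟨hcell, by omega⟩
  · rw [if_neg hcell] at heq
    exact absurd heq (by simp)

theorem A_go_spec (w h : Int) :
    ∀ (fuel : Nat) (g : List (List String)),
      ((g.headD []).length : Int) = w → ((g.length : Int)) = h → (cnt g).toNat < fuel →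
      ∃ g', part2Go fuel g = cnt g - cnt g' ∧ Shape g' = Shape g ∧ SubF (fA g') (fA g) ∧
        Good w h (fA g') ∧ (∀ S, Good w h S → SubF S (fA g) → SubF S (fA g')) := by
  intro fuel
  induction fuel with
  | zero => intro g hw hh hf; omega
  | succ f ih =>
    intro g hw hh hf
    rcases sweepA_spec g with ⟨hsh, hsub, hpres, hcons, hnn, hzero⟩
    rw [hw, hh] at hpres hzero
    have hcnt0 : 0 ≤ cnt (sweepA g).1 := by unfold cnt; exact Int.natCast_nonneg _
    have hcnt1 : 0 ≤ cnt g := by unfold cnt; exact Int.natCast_nonneg _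
    by_cases hpos : (sweepA g).2 > 0
    · have hw' : (((sweepA g).1.headD []).length : Int) = w := by
        rw [headD_eq_getD, shape_rowlen hsh 0, ← headD_eq_getD, hw]
      have hh' : (((sweepA g).1.length : Int)) = h := by
        rw [shape_length hsh, hh]
      have hfuel' : (cnt (sweepA g).1).toNat < f := by omega
      rcases ih (sweepA g).1 hw' hh' hfuel' with ⟨g', hval, hsh', hsub', hgood', hpres'⟩
      refine ⟨g', ?_, hsh'.trans hsh, fun v hv => hsub v (hsub' v hv),
        hgood', fun S hg hs => hpres' S hg (hpres S hg hs)⟩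
      simp only [part2Go]
      rw [if_pos hpos, hval]
      omega
    · have hz : (sweepA g).2 = 0 := by omega
      rcases hzero hz with ⟨hg1, hgood⟩
      refine ⟨g, ?_, rfl, fun v hv => hv, hgood, fun S _ hs => hs⟩
      simp only [part2Go]
      rw [if_neg hpos]
      omega

theorem B_go_spec (w h : Int) :
    ∀ (fuel : Nat) (live : List (Int × Int)) (total : Int), live.length < fuel →
      ∃ p : Int × Int → Bool,
        bGo fuel w h total live = total - ((live.filter p).length : Int) ∧
        Good w h (fun u => decide (u ∈ live.filter p)) ∧
        (∀ S, Good w h S → SubF S (fun u => decide (u ∈ live)) →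
          SubF S (fun u => decide (u ∈ live.filter p))) := by
  intro fuel
  induction fuel with
  | zero => intro live total hf; omega
  | succ f ih =>
    intro live total hf
    simp only [bGo]
    by_cases heq : (live.filter (fun v => decide (4 ≤ degList w h live v))).length = live.length
    · rw [if_pos heq]
      refine ⟨fun _ => true, ?_, ?_, ?_⟩
      · rw [List.filter_true, heq]
      · simp only [List.filter_true]
        intro v hv
        have hvmem : v ∈ live := of_decide_eq_true hv
        have hone := List.length_filter_eq_length_iff.1 heq v hvmem
        have hdeg : (4 : Int) ≤ degList w h live v := of_decide_eq_true hone
        rw [degList_eq_degF] at hdeg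
        exact hdeg
      · intro S hg hs
        simp only [List.filter_true]
        exact hs
    · rw [if_neg heq]
      have hlt : (live.filter (fun v => decide (4 ≤ degList w h live v))).length < live.length :=
        lt_of_le_of_ne (List.length_filter_le _ _) heq
      rcases ih (live.filter (fun v => decide (4 ≤ degList w h live v))) total (by omega) with
        ⟨p, hval, hgood, hpres⟩
      refine ⟨fun v => p v && decide (4 ≤ degList w h live v), ?_, ?_, ?_⟩
      · rw [hval, List.filter_filter]
      · simp only [List.filter_filter] at hgood
        exact hgood
      · intro S hg hs
        simp only [List.filter_filter] at hpres
        apply hpres S hg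
        intro u hu
        have hum : u ∈ live := of_decide_eq_true (hs u hu)
        have hdeg : (4 : Int) ≤ degF w h S u := hg u hu
        have hmono := degF_mono w h S (fun x => decide (x ∈ live)) (fun x hx => hs x hx) u
        rw [← degList_eq_degF] at hmono
        exact decide_eq_true (List.mem_filter.2 ⟨hum, decide_eq_true (by omega)⟩)

theorem cnt_le_cells (g : List (List String)) :
    (cnt g).toNat ≤ ((g.map List.length).sum) := by
  unfold cnt buildLive
  rw [List.length_flatMap, Int.toNat_natCast]
  have hmap : (List.range g.length).map (fun r => (g.getD r []).length) = g.map List.length := by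
    apply List.ext_getElem
    · simp
    · intro i h1 h2
      simp only [List.getElem_map, List.getElem_range]
      rw [List.getD_eq_getElem g [] (by simpa using h1)]
  rw [← hmap]
  apply List.sum_le_sum
  intro r _
  calc ((List.range ((g.getD r []).length)).filterMap (fun c =>
          if (g.getD r []).getD c "" = "@" then some ((r : Int), (c : Int)) else none)).length
      ≤ (List.range ((g.getD r []).length)).length := List.length_filterMap_le _ _
    _ = (g.getD r []).length := List.length_range

-- ===== VERDICT (by name: the statement is the Claim_ definition above) =====
theorem part2_spec : Claim_equal_part2 := by
  intro input hdom hpre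
  unfold Spec_part2
  simp only [part2, part2_alt]
  have hfA : (cnt input).toNat < (input.map List.length).sum + 1 := by
    have := cnt_le_cells input
    omega
  rcases A_go_spec (((input.headD []).length : Int)) ((input.length : Int))
      ((input.map List.length).sum + 1) input rfl rfl hfA with ⟨g', hval, hsh, hsub, hgoodA, hpresA⟩
  rcases B_go_spec (((input.headD []).length : Int)) ((input.length : Int))
      ((buildLive input).length + 1) (buildLive input) (((buildLive input).length : Int))
      (by omega) with ⟨p, hvalB, hgoodB, hpresB⟩
  rw [hval, hvalB]
  have hflt : buildLive g' = (buildLive input).filter (fA g') := buildLive_filter input g' hsh hsub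
  have hcong : ∀ v ∈ buildLive input, fA g' v = p v := by
    intro v hv
    have hdir1 : fA g' v = true → p v = true := by
      intro hfg
      have hsubBL : SubF (fA g') (fun u => decide (u ∈ buildLive input)) := by
        intro u hu
        exact decide_eq_true ((fA_iff_mem input u).1 (hsub u hu))
      have hmem := hpresB (fA g') hgoodA hsubBL v hfg
      exact (List.mem_filter.1 (of_decide_eq_true hmem)).2
    have hdir2 : p v = true → fA g' v = true := by
      intro hp
      have hSsub : SubF (fun u => decide (u ∈ (buildLive input).filter p)) (fA input) := by
        intro u hu
        exact (fA_iff_mem input u).2 (List.mem_filter.1 (of_decide_eq_true hu)).1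
      exact hpresA (fun u => decide (u ∈ (buildLive input).filter p)) hgoodB hSsub v
        (decide_eq_true (List.mem_filter.2 ⟨hv, hp⟩))
    cases hb : fA g' v
    · cases hb2 : p v
      · rfl
      · exact absurd (hdir2 hb2) (by simp [hb])
    · rw [hdir1 hb]
  have hlen : (buildLive g').length = ((buildLive input).filter p).length := by
    rw [hflt, List.filter_congr hcong]
  unfold cnt
  rw [hlen]
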